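-- pv_equiv track=rewrite | github.com/Krishneshwaran/Onedot_Proctor_Backend | staff/studentstats.py | process_test_statuses
-- ===== SOURCE A (Python) =====
-- def process_test_statuses(student_id, contest_ids, coding_report_map):
--     """
--     Process test statuses and calculate statistics for a student.
--
--     Args:
--         student_id (str): Student ID
--         contest_ids (list): List of contest IDs
--         coding_report_map (dict): Map of contest reports
--
--     Returns:
--         tuple: Completed tests count, in-progress tests count, and total score
--     """
--     completed_tests = 0
--     in_progress_tests = 0
--     total_score = 0
--
--     for contest_id in contest_ids:
--         report = coding_report_map.get(contest_id)
--
--         if not report: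
--             in_progress_tests += 1
--         else:
--             student_found = False
--             for student in report.get("students", []):
--                 if str(student.get("student_id")) == student_id:
--                     student_found = True
--                     student_status = student.get("status")
--
--                     if student_status == "Completed":
--                         completed_tests += 1
--                         # Could add score calculation here
--                     else:
--                         in_progress_tests += 1
--                     break
--
--             if not student_found:
--                 in_progress_tests += 1
--
--     return completed_tests, in_progress_tests, total_score
-- ===== SOURCE B (Python) =====
-- def process_test_statuses(student_id, contest_ids, coding_report_map):
--     # Pass 1: index the report map once — the set of contest ids whose report
--     # lists this student with status "Completed".
--     completed_ids = set()
--     for cid, report in coding_report_map.items():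
--         if not report:
--             continue
--         for student in report.get("students", []):
--             if str(student.get("student_id")) == student_id:
--                 if student.get("status") == "Completed":
--                     completed_ids.add(cid)
--                 break
--     # Pass 2: count completed contests by set membership; the rest are in progress.
--     completed = sum(1 for cid in contest_ids if cid in completed_ids)
--     return completed, len(contest_ids) - completed, 0
-- ===== Notes on version B (the rewrite author's own statement) =====
-- stated objective: alternative
-- what changed: B is a two-pass decomposition: it first builds, in one pass over the report map, the set of contest ids the student completed, then counts contest_ids by set membership and derives in_progress as the complement, instead of A's per-contest dict lookup with a student_found flag and three in_progress increments.
import Mathlib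
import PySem

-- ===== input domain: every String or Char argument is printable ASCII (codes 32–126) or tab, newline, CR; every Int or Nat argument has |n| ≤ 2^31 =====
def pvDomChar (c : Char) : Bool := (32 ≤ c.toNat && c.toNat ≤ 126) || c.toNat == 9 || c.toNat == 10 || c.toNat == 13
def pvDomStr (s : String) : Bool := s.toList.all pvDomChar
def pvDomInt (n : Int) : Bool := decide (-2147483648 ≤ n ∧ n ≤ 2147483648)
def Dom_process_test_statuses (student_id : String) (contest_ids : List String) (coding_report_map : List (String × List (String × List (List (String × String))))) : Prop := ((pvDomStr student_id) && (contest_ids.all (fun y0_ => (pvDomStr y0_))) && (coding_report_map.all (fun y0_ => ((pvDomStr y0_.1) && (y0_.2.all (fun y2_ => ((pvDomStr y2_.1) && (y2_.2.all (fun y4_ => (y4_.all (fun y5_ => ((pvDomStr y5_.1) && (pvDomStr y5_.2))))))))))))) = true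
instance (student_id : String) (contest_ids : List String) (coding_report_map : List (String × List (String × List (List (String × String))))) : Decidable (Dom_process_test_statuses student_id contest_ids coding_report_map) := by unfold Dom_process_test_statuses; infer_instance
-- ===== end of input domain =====

-- B is an alternative two-pass decomposition: it first indexes the report map once into the set
-- of contest ids this student completed, then counts contest_ids by set membership;
-- in_progress is the complement. Same return value, no per-contest map lookup or flag logic.

-- Python dict.get on an association list (first binding wins)
def assocGet? {α : Type} (m : List (String × α)) (k : String) : Option α :=
  (m.find? (fun p => p.1 == k)).map (·.2)

-- str(student.get("student_id")) — a missing key (None) prints as "None"; present values are strings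
def strGet (s : List (String × String)) (k : String) : String :=
  match assocGet? s k with
  | some v => v
  | none => "None"

-- ===== PORT A =====
-- inner 'for student in students: … break' loop plus the trailing 'if not student_found' check
def ptsScan (student_id : String) : List (List (String × String)) → Int × Int → Int × Int
  | [], (c, i) => (c, i + 1)          -- loop ends, student_found is still False
  | s :: rest, (c, i) =>
    if strGet s "student_id" = student_id then
      if assocGet? s "status" = some "Completed" then (c + 1, i) else (c, i + 1)
    else ptsScan student_id rest (c, i)

def process_test_statuses (student_id : String) (contest_ids : List String) (coding_report_map : List (String × List (String × List (List (String × String))))) : Int × Int × Int :=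
  let st := contest_ids.foldl (fun (st : Int × Int) contest_id =>
    match assocGet? coding_report_map contest_id with
    | none => (st.1, st.2 + 1)        -- report is None
    | some report =>
      if report = [] then (st.1, st.2 + 1)   -- 'if not report' on an empty dict
      else ptsScan student_id ((assocGet? report "students").getD []) st) (0, 0)
  (st.1, st.2, 0)

-- ===== PORT B =====
-- body of B's pass-1 loop over one report: was the student found with status "Completed"?
def ptsReportCompleted (student_id : String) (report : List (String × List (List (String × String)))) : Bool :=
  if report = [] then false           -- 'if not report: continue'
  else
    match ((assocGet? report "students").getD []).find? (fun s => strGet s "student_id" == student_id) with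
    | none => false                   -- break never reached / nothing added
    | some s => assocGet? s "status" == some "Completed"

-- pass 1: fold over the report map's items building the completed-contest set.
-- Python iterates a dict, whose keys are unique; since the association list models lookup as
-- first-binding-wins, the 'seen' accumulator skips later duplicate bindings of the same key.
def ptsIndex (student_id : String) : List (String × List (String × List (List (String × String)))) → List String → List String → List String
  | [], _, comp => comp
  | (k, r) :: rest, seen, comp =>
    if seen.contains k then ptsIndex student_id rest seen comp
    else ptsIndex student_id rest (k :: seen)
      (if ptsReportCompleted student_id r then comp ++ [k] else comp)

def process_test_statuses_alt (student_id : String) (contest_ids : List String) (coding_report_map : List (String × List (String × List (List (String × String))))) : Int × Int × Int :=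
  let completed_ids := ptsIndex student_id coding_report_map [] []
  -- pass 2: count contest ids that are in the completed set
  let completed := contest_ids.foldl (fun acc cid => acc + (if completed_ids.contains cid then 1 else 0)) (0 : Int)
  (completed, (contest_ids.length : Int) - completed, 0)

-- ===== PRECONDITION & SPEC =====
def Spec_process_test_statuses (student_id : String) (contest_ids : List String) (coding_report_map : List (String × List (String × List (List (String × String))))) (out : Int × Int × Int) : Prop := out = process_test_statuses_alt student_id contest_ids coding_report_map
instance (student_id : String) (contest_ids : List String) (coding_report_map : List (String × List (String × List (List (String × String))))) (out : Int × Int × Int) : Decidable (Spec_process_test_statuses student_id contest_ids coding_report_map out) := by unfold Spec_process_test_statuses; infer_instance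

-- ===== CLAIM (what is proved, stated in full; the proofs are below) =====
def Claim_equal_process_test_statuses : Prop := ∀ (student_id : String) (contest_ids : List String) (coding_report_map : List (String × List (String × List (List (String × String))))), Dom_process_test_statuses student_id contest_ids coding_report_map → Spec_process_test_statuses student_id contest_ids coding_report_map (process_test_statuses student_id contest_ids coding_report_map)

-- ===== LEMMAS AND PROOFS =====

-- the one-shot answer for a contest id, through the first binding of the map
def ptsLookup (student_id : String) (m : List (String × List (String × List (List (String × String))))) (cid : String) : Bool :=
  match assocGet? m cid with
  | none => false
  | some r => ptsReportCompleted student_id r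

-- A's inner scan adds 1 to exactly one of the counters, decided by ptsReportCompleted's match
lemma ptsScan_char (student_id : String) (students : List (List (String × String))) (c i : Int) :
    ptsScan student_id students (c, i) =
      (if (match students.find? (fun s => strGet s "student_id" == student_id) with
           | none => false
           | some s => assocGet? s "status" == some "Completed") then (c + 1, i) else (c, i + 1)) := by
  induction students with
  | nil => simp [ptsScan]
  | cons s rest ih =>
    by_cases h : strGet s "student_id" = student_id
    · have hb : (strGet s "student_id" == student_id) = true := by simp [h]
      simp only [ptsScan, List.find?, hb]
      rw [if_pos h]
      by_cases h2 : assocGet? s "status" = some "Completed" <;> simp [h2]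
    · have hb : (strGet s "student_id" == student_id) = false := by simp [h]
      simp only [ptsScan, List.find?, hb]
      rw [if_neg h]
      exact ih

-- per-contest step of A, phrased through ptsLookup
lemma stepA_char (student_id : String) (m : List (String × List (String × List (List (String × String))))) (cid : String) (c i : Int) :
    (match assocGet? m cid with
     | none => (c, i + 1)
     | some report =>
       if report = [] then (c, i + 1)
       else ptsScan student_id ((assocGet? report "students").getD []) (c, i)) =
    (if ptsLookup student_id m cid then (c + 1, i) else (c, i + 1)) := by
  unfold ptsLookup ptsReportCompleted
  cases assocGet? m cid with
  | none => simp
  | some report =>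
    by_cases hr : report = []
    · simp [hr]
    · simp only [hr, if_false, ptsScan_char]

-- A's whole fold: the pair is (c₀ + completed, i₀ + (len - completed))
lemma fold_char (student_id : String) (m : List (String × List (String × List (List (String × String))))) (cids : List String) (c i : Int) :
    cids.foldl (fun (st : Int × Int) contest_id =>
      match assocGet? m contest_id with
      | none => (st.1, st.2 + 1)
      | some report =>
        if report = [] then (st.1, st.2 + 1)
        else ptsScan student_id ((assocGet? report "students").getD []) st) (c, i) =
    (c + (cids.map (fun cid => if ptsLookup student_id m cid then (1 : Int) else 0)).sum,
     i + ((cids.length : Int) - (cids.map (fun cid => if ptsLookup student_id m cid then (1 : Int) else 0)).sum)) := by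
  induction cids generalizing c i with
  | nil => simp
  | cons cid rest ih =>
    simp only [List.foldl_cons, List.map_cons, List.sum_cons, List.length_cons]
    rw [stepA_char]
    by_cases hb : ptsLookup student_id m cid <;>
      · simp only [hb, if_true, ih]
        refine Prod.ext ?_ ?_ <;> simp <;> ring

-- membership in B's index = first-binding completion, for keys not yet seen
lemma ptsIndex_mem (student_id : String) (m : List (String × List (String × List (List (String × String))))) (seen comp : List String) (cid : String) :
    (ptsIndex student_id m seen comp).contains cid =
      (comp.contains cid || (!seen.contains cid && ptsLookup student_id m cid)) := by
  induction m generalizing seen comp with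
  | nil => simp [ptsIndex, ptsLookup, assocGet?]
  | cons p rest ih =>
    obtain ⟨k, r⟩ := p
    by_cases hk : k = cid
    · subst hk
      by_cases hs : seen.contains k
      · simp only [ptsIndex, hs, if_true, ih]
        simp [ptsLookup, assocGet?]
      · have hget : ptsLookup student_id ((k, r) :: rest) k = ptsReportCompleted student_id r := by
          simp [ptsLookup, assocGet?]
        simp only [ptsIndex, hs, Bool.false_eq_true, if_false, ih, hget]
        by_cases hc : ptsReportCompleted student_id r <;>
          simp [hc]
    · have hbk : (k == cid) = false := by simp [hk]
      have hget : ptsLookup student_id ((k, r) :: rest) cid = ptsLookup student_id rest cid := by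
        simp [ptsLookup, assocGet?, List.find?, hbk]
      by_cases hs : seen.contains k
      · simp only [ptsIndex, hs, if_true, ih, hget]
      · simp only [ptsIndex, hs, Bool.false_eq_true, if_false, ih, hget]
        by_cases hc : ptsReportCompleted student_id r <;>
          simp [hc, Ne.symm hk]

-- ===== VERDICT (by name: the statement is the Claim_ definition above) =====
theorem process_test_statuses_spec : Claim_equal_process_test_statuses := by
  intro student_id contest_ids coding_report_map _
  have hmem : ∀ cid, (ptsIndex student_id coding_report_map [] []).contains cid = ptsLookup student_id coding_report_map cid := by
    intro cid; rw [ptsIndex_mem]; simp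
  unfold Spec_process_test_statuses
  simp only [process_test_statuses, process_test_statuses_alt, fold_char, hmem, PySem.List.foldl_add]
  simp
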